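-- pv_equiv track=rewrite | github.com/patriciomelor/dmp | src/status_encargado/views.py | tamano_grafico_1
-- ===== SOURCE A (Python) =====
-- def tamano_grafico_1(lista_grafico_uno):
--
--     # lista_grafico_uno = self.grafico_1()
--     maximo = 0
--     cont = 0
--
--     #Se obtiene el valor máximo del gráfico
--     for valores in lista_grafico_uno:
--         if cont == 0:
--             maximo = valores[1]
--             cont = 1
--         else:
--             if maximo < valores[1]:
--                 maximo = valores[1]
--
--     #Se verífica que el maximo sea divisible por 10, para el caso de un maximo superior a 20
--     division_exacta = 0
--     if maximo > 20:
--         division_exacta = maximo % 10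
--         while division_exacta != 0:
--             maximo = maximo + 1
--             division_exacta = maximo % 10
--
--     if maximo <= 20:
--         maximo = maximo + 1
--
--     return maximo
-- ===== SOURCE B (Python) =====
-- def tamano_grafico_1(lista_grafico_uno):
--     maximo = max((v[1] for v in lista_grafico_uno), default=0)
--     if maximo > 20:
--         return -(-maximo // 10) * 10
--     return maximo + 1
-- ===== Notes on version B (the rewrite author's own statement) =====
-- stated objective: simpler
-- what changed: A's cont-flag running-max loop and increment-until-divisible-by-10 while loop are replaced by max(..., default=0) and a single closed-form ceiling -(-maximo//10)*10.
import Mathlib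
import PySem

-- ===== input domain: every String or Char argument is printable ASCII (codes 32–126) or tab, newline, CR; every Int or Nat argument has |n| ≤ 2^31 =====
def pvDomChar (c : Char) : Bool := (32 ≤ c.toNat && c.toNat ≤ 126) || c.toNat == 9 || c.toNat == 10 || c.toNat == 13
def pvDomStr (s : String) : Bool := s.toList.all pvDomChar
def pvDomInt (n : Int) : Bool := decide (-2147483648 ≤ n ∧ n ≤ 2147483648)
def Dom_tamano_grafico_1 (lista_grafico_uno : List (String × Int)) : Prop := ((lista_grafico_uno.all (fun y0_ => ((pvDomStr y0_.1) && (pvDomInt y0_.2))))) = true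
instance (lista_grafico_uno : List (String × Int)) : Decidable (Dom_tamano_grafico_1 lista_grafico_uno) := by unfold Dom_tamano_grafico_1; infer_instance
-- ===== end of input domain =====

-- B replaces A's two-phase loop (running max with a cont flag, then increment-until-divisible-by-10)
-- by max(..., default=0) and a closed-form ceiling to a multiple of 10; objective: simpler.

-- ===== PORT A =====
-- A's while loop: increment maximo until maximo % 10 == 0.  It runs at most 9 times
-- (each step raises maximo % 10 until it hits 0), so fuel = 10 is a totality guard that
-- is never exhausted; the lemma tgLoop_eq below is proved under that fuel.
def tgLoop : Nat → Int → Int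
  | 0, maximo => maximo
  | fuel + 1, maximo =>
    if PySem.Int.mod maximo 10 ≠ 0 then tgLoop fuel (maximo + 1) else maximo

def tamano_grafico_1 (lista_grafico_uno : List (String × Int)) : Int :=
  let s := lista_grafico_uno.foldl
    (fun (st : Int × Int) valores =>
      if st.2 == 0 then (valores.2, 1)
      else if st.1 < valores.2 then (valores.2, st.2) else st)
    (0, 0)
  let maximo := s.1
  let maximo := if maximo > 20 then tgLoop 10 maximo else maximo
  if maximo ≤ 20 then maximo + 1 else maximo

-- ===== PORT B =====
def tamano_grafico_1_alt (lista_grafico_uno : List (String × Int)) : Int :=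
  let maximo :=
    match PySem.List.max? (lista_grafico_uno.map (fun v => v.2)) (fun y => y) with
    | some m => m
    | none => 0
  if maximo > 20 then -(PySem.Int.floordiv (-maximo) 10) * 10 else maximo + 1

-- ===== PRECONDITION & SPEC =====
def Spec_tamano_grafico_1 (lista_grafico_uno : List (String × Int)) (out : Int) : Prop := out = tamano_grafico_1_alt lista_grafico_uno
instance (lista_grafico_uno : List (String × Int)) (out : Int) : Decidable (Spec_tamano_grafico_1 lista_grafico_uno out) := by unfold Spec_tamano_grafico_1; infer_instance

-- ===== CLAIM (what is proved, stated in full; the proofs are below) =====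
def Claim_equal_tamano_grafico_1 : Prop := ∀ (lista_grafico_uno : List (String × Int)), Dom_tamano_grafico_1 lista_grafico_uno → Spec_tamano_grafico_1 lista_grafico_uno (tamano_grafico_1 lista_grafico_uno)

-- ===== LEMMAS AND PROOFS =====

-- A's while loop computes the ceiling of m to a multiple of 10
theorem tgLoop_eq_aux (fuel : Nat) (m : Int)
    (h : ((10 - m % 10) % 10).toNat ≤ fuel) :
    tgLoop fuel m = -(PySem.Int.floordiv (-m) 10) * 10 := by
  induction fuel generalizing m with
  | zero =>
    have h0 : m % 10 = 0 := by omega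
    rw [tgLoop, PySem.Int.floordiv_eq_ediv_of_pos (by norm_num : (0:Int) < 10)]
    omega
  | succ fuel ih =>
    rw [tgLoop]
    by_cases hm : PySem.Int.mod m 10 ≠ 0
    · rw [if_pos hm]
      rw [PySem.Int.mod_eq_emod_of_pos (by norm_num : (0:Int) < 10)] at hm
      rw [ih (m + 1) (by omega)]
      rw [PySem.Int.floordiv_eq_ediv_of_pos (by norm_num : (0:Int) < 10),
          PySem.Int.floordiv_eq_ediv_of_pos (by norm_num : (0:Int) < 10)]
      omega
    · rw [if_neg hm]
      rw [PySem.Int.mod_eq_emod_of_pos (by norm_num : (0:Int) < 10)] at hm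
      rw [PySem.Int.floordiv_eq_ediv_of_pos (by norm_num : (0:Int) < 10)]
      omega

theorem tgLoop_eq (m : Int) : tgLoop 10 m = -(PySem.Int.floordiv (-m) 10) * 10 :=
  tgLoop_eq_aux 10 m (by omega)

-- once the cont flag is 1, A's fold is the running max
theorem foldA_eq (t : List (String × Int)) (m : Int) :
    t.foldl
      (fun (st : Int × Int) valores =>
        if st.2 == 0 then (valores.2, 1)
        else if st.1 < valores.2 then (valores.2, st.2) else st)
      (m, 1)
    = ((t.map (fun v => v.2)).foldl max m, 1) := by
  induction t generalizing m with
  | nil => simp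
  | cons p t ih =>
    simp only [List.foldl_cons, List.map_cons]
    have step : (if ((1:Int) == 0) = true then (p.2, (1:Int))
        else if m < p.2 then (p.2, 1) else (m, 1)) = (max m p.2, 1) := by
      simp only [show ((1:Int) == 0) = false from rfl, Bool.false_eq_true, if_false]
      split_ifs with h
      · rw [max_eq_right h.le]
      · rw [max_eq_left (not_lt.mp h)]
    rw [step, ih]

theorem tamano_eq (l : List (String × Int)) :
    tamano_grafico_1 l = tamano_grafico_1_alt l := by
  cases l with
  | nil => simp [tamano_grafico_1, tamano_grafico_1_alt, PySem.List.max?]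
  | cons p t =>
    unfold tamano_grafico_1 tamano_grafico_1_alt
    have step1 : (fun (st : Int × Int) valores =>
        if st.2 == 0 then (valores.2, 1)
        else if st.1 < valores.2 then (valores.2, st.2) else st) ((0:Int), (0:Int)) p
        = (p.2, 1) := rfl
    simp only [List.foldl_cons, List.map_cons, step1, foldA_eq, PySem.List.max?_id_cons]
    set M := (t.map (fun v => v.2)).foldl max p.2 with hM
    by_cases h : M > 20
    · rw [if_pos h, if_pos h, tgLoop_eq]
      rw [PySem.Int.floordiv_eq_ediv_of_pos (by norm_num : (0:Int) < 10)]
      have : ¬ (-(-M / 10) * 10 ≤ 20) := by omega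
      rw [if_neg this]
    · rw [if_neg h, if_neg h, if_pos (by omega : M ≤ 20)]

-- ===== VERDICT (by name: the statement is the Claim_ definition above) =====
theorem tamano_grafico_1_spec : Claim_equal_tamano_grafico_1 := by
  intro l _
  unfold Spec_tamano_grafico_1
  exact tamano_eq l
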